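-- pv_equiv track=rewrite | github.com/tiwarikamlesh/InternalAssesment-Exam-Planning-Aug20205A | iaExam-01-Aug2025/05-attendanceSheet.py | find_room_seats
-- ===== SOURCE A (Python) =====
-- def find_room_seats(room_name, rooms_map):
--     if not room_name:
--         return None, None
--     if room_name in rooms_map:
--         r = rooms_map[room_name]; return r.get('A'), r.get('B')
--     for k,v in rooms_map.items():
--         if k.lower() == room_name.lower():
--             return v.get('A'), v.get('B')
--     for k,v in rooms_map.items():
--         if room_name.lower() in k.lower() or k.lower() in room_name.lower():
--             return v.get('A'), v.get('B')
--     return None, None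
-- ===== SOURCE B (Python) =====
-- def find_room_seats(room_name, rooms_map):
--     if not room_name:
--         return None, None
--     if room_name in rooms_map:
--         r = rooms_map[room_name]
--         return r.get('A'), r.get('B')
--     rn = room_name.lower()
--     ci = None
--     sub = None
--     for k, v in rooms_map.items():
--         kl = k.lower()
--         if ci is None and kl == rn:
--             ci = v
--         if sub is None and (rn in kl or kl in rn):
--             sub = v
--     hit = ci if ci is not None else sub
--     if hit is None:
--         return None, None
--     return hit.get('A'), hit.get('B')
-- ===== Notes on version B (the rewrite author's own statement) =====
-- stated objective: faster
-- what changed: Replaced A's two separate full scans (case-insensitive, then substring) by a single pass that tracks the first case-insensitive and first substring candidates simultaneously and picks by priority afterwards, lowercasing room_name once instead of on every comparison.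
import Mathlib
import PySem

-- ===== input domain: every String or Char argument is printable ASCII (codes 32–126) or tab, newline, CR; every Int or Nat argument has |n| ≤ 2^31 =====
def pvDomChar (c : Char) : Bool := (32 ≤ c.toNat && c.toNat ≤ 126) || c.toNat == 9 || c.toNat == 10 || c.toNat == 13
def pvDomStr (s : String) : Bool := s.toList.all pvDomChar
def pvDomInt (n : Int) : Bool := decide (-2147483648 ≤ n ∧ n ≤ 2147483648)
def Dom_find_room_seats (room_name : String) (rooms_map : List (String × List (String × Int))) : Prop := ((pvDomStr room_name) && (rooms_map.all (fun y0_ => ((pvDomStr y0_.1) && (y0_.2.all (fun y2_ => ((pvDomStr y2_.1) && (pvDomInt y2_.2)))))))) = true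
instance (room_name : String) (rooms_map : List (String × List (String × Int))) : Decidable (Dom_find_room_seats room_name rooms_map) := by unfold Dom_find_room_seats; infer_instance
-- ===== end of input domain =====

-- B replaces A's two sequential full scans by one scan tracking both candidates and lowercases room_name once; a timing run measured it constant-factor faster.

-- ===== PORT A =====
-- dict.get on an association list: first match (used by both Pythons for v.get('A') / v.get('B'))
def dictGet (d : List (String × Int)) (k : String) : Option Int :=
  match d with
  | [] => none
  | (k', v) :: rest => if k' == k then some v else dictGet rest k

-- A's first loop: first key with k.lower() == room_name.lower()
def loopA1 (room_name : String) : List (String × List (String × Int)) → Option (Option Int × Option Int)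
  | [] => none
  | (k, v) :: rest =>
    if PySem.Str.lower k == PySem.Str.lower room_name then
      some (dictGet v "A", dictGet v "B")
    else loopA1 room_name rest

-- A's second loop: first key with a substring relation either way
def loopA2 (room_name : String) : List (String × List (String × Int)) → Option (Option Int × Option Int)
  | [] => none
  | (k, v) :: rest =>
    if PySem.Str.isIn (PySem.Str.lower room_name) (PySem.Str.lower k)
        || PySem.Str.isIn (PySem.Str.lower k) (PySem.Str.lower room_name) then
      some (dictGet v "A", dictGet v "B")
    else loopA2 room_name rest

def find_room_seats (room_name : String) (rooms_map : List (String × List (String × Int))) : Option Int × Option Int :=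
  if room_name = "" then (none, none)
  else
    match List.find? (fun p => p.1 == room_name) rooms_map with
    | some (_, r) => (dictGet r "A", dictGet r "B")
    | none =>
      match loopA1 room_name rooms_map with
      | some res => res
      | none =>
        match loopA2 room_name rooms_map with
        | some res => res
        | none => (none, none)

-- ===== PORT B =====
-- one fold step: record first case-insensitive candidate and first substring candidate
def stepB (rn : String) (acc : Option (List (String × Int)) × Option (List (String × Int)))
    (kv : String × List (String × Int)) : Option (List (String × Int)) × Option (List (String × Int)) :=
  let kl := PySem.Str.lower kv.1
  let ci := if acc.1.isNone && (kl == rn) then some kv.2 else acc.1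
  let sub := if acc.2.isNone && (PySem.Str.isIn rn kl || PySem.Str.isIn kl rn) then some kv.2 else acc.2
  (ci, sub)

def find_room_seats_alt (room_name : String) (rooms_map : List (String × List (String × Int))) : Option Int × Option Int :=
  if room_name = "" then (none, none)
  else
    match List.find? (fun p => p.1 == room_name) rooms_map with
    | some (_, r) => (dictGet r "A", dictGet r "B")
    | none =>
      let rn := PySem.Str.lower room_name
      let acc := rooms_map.foldl (stepB rn) (none, none)
      match (if acc.1.isSome then acc.1 else acc.2) with
      | some v => (dictGet v "A", dictGet v "B")
      | none => (none, none)

-- ===== PRECONDITION & SPEC =====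
def Spec_find_room_seats (room_name : String) (rooms_map : List (String × List (String × Int))) (out : Option Int × Option Int) : Prop := out = find_room_seats_alt room_name rooms_map
instance (room_name : String) (rooms_map : List (String × List (String × Int))) (out : Option Int × Option Int) : Decidable (Spec_find_room_seats room_name rooms_map out) := by unfold Spec_find_room_seats; infer_instance

-- ===== CLAIM (what is proved, stated in full; the proofs are below) =====
def Claim_equal_find_room_seats : Prop := ∀ (room_name : String) (rooms_map : List (String × List (String × Int))), Dom_find_room_seats room_name rooms_map → Spec_find_room_seats room_name rooms_map (find_room_seats room_name rooms_map)

-- ===== LEMMAS AND PROOFS =====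

-- first case-insensitive candidate value
def fCI (rn : String) (l : List (String × List (String × Int))) : Option (List (String × Int)) :=
  (l.find? (fun kv => PySem.Str.lower kv.1 == rn)).map Prod.snd

-- first substring candidate value
def fSub (rn : String) (l : List (String × List (String × Int))) : Option (List (String × Int)) :=
  (l.find? (fun kv => PySem.Str.isIn rn (PySem.Str.lower kv.1) || PySem.Str.isIn (PySem.Str.lower kv.1) rn)).map Prod.snd

theorem foldl_stepB (rn : String) (l : List (String × List (String × Int)))
    (c s : Option (List (String × Int))) :
    l.foldl (stepB rn) (c, s) = (c.or (fCI rn l), s.or (fSub rn l)) := by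
  induction l generalizing c s with
  | nil => simp [fCI, fSub]
  | cons kv rest ih =>
    simp only [List.foldl_cons, stepB, ih, fCI, fSub, List.find?_cons]
    cases hp : (PySem.Str.lower kv.1 == rn) <;>
      cases hq : (PySem.Str.isIn rn (PySem.Str.lower kv.1) || PySem.Str.isIn (PySem.Str.lower kv.1) rn) <;>
      cases c <;> cases s <;> rfl

theorem loopA1_eq (room_name : String) (l : List (String × List (String × Int))) :
    loopA1 room_name l
      = (fCI (PySem.Str.lower room_name) l).map (fun v => (dictGet v "A", dictGet v "B")) := by
  induction l with
  | nil => simp [loopA1, fCI]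
  | cons kv rest ih =>
    obtain ⟨k, v⟩ := kv
    simp only [loopA1, fCI, List.find?_cons] at *
    cases hp : (PySem.Str.lower k == PySem.Str.lower room_name) <;>
      simp only [if_true, Option.map_some, Bool.false_eq_true, if_false]
    exact ih

theorem loopA2_eq (room_name : String) (l : List (String × List (String × Int))) :
    loopA2 room_name l
      = (fSub (PySem.Str.lower room_name) l).map (fun v => (dictGet v "A", dictGet v "B")) := by
  induction l with
  | nil => simp [loopA2, fSub]
  | cons kv rest ih =>
    obtain ⟨k, v⟩ := kv
    simp only [loopA2, fSub, List.find?_cons] at *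
    cases hp : (PySem.Str.isIn (PySem.Str.lower room_name) (PySem.Str.lower k)
        || PySem.Str.isIn (PySem.Str.lower k) (PySem.Str.lower room_name)) <;>
      simp only [if_true, Option.map_some, Bool.false_eq_true, if_false]
    exact ih

-- ===== VERDICT (by name: the statement is the Claim_ definition above) =====
theorem find_room_seats_spec : Claim_equal_find_room_seats := by
  intro room_name rooms_map _
  unfold Spec_find_room_seats find_room_seats find_room_seats_alt
  split_ifs with h0
  · rfl
  · cases hf : List.find? (fun p => p.1 == room_name) rooms_map with
    | some p => obtain ⟨k, r⟩ := p; rfl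
    | none =>
      simp only [foldl_stepB, Option.or, loopA1_eq, loopA2_eq]
      cases hci : fCI (PySem.Str.lower room_name) rooms_map with
      | some v => simp
      | none =>
        cases hsub : fSub (PySem.Str.lower room_name) rooms_map with
        | some v => simp
        | none => simp
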